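-- pv_equiv track=rewrite | github.com/Olimi-net/Example | editor.py | rem_space
-- ===== SOURCE A (Python) =====
-- def rem_space(t, k=4):
--     r = []
--     cnt = k
--     for i in range(len(t)):
--         if cnt > 0:
--             if t[i] == ' ':
--                 cnt -= 1
--                 continue
--             else:
--                 cnt = 0
--         r.append(t[i])
--     return ''.join(r)
-- ===== SOURCE B (Python) =====
-- def rem_space(t, k=4):
--     n = 0
--     while n < k and n < len(t) and t[n] == ' ':
--         n += 1
--     return ''.join(t[n:])
-- ===== Notes on version B (the rewrite author's own statement) =====
-- stated objective: simpler
-- what changed: Replaces A's full-pass fold carrying a countdown counter and an output accumulator with a bounded prefix scan counting the leading spaces to drop, followed by a single slice/join of the tail; the per-character Python loop over the whole input disappears.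
import Mathlib
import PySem

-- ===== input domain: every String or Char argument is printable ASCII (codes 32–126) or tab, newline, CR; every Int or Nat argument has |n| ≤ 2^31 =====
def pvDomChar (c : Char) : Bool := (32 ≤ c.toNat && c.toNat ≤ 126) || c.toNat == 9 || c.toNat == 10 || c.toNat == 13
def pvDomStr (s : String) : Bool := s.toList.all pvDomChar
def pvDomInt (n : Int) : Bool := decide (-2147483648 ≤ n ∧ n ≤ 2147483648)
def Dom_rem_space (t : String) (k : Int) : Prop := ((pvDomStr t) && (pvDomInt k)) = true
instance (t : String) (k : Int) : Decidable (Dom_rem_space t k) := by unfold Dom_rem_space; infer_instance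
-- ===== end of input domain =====

-- ===== PORT A =====
-- B replaces A's full-pass counter fold with a bounded prefix-space count plus one tail drop (simpler decomposition).
def remStepA (s : List Char × Int) (c : Char) : List Char × Int :=
  if s.2 > 0 then
    if c = ' ' then (s.1, s.2 - 1)
    else (s.1 ++ [c], 0)
  else (s.1 ++ [c], s.2)

def rem_space (t : String) (k : Int) : String :=
  String.ofList ((t.toList.foldl remStepA ([], k)).1)

-- ===== PORT B =====
-- counts leading spaces, at most k of them (the while-loop of Source B)
def remCount (cs : List Char) (k : Int) : Nat :=
  match cs with
  | [] => 0
  | c :: rest => if 0 < k ∧ c = ' ' then remCount rest (k - 1) + 1 else 0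

def rem_space_alt (t : String) (k : Int) : String :=
  String.ofList (t.toList.drop (remCount t.toList k))

-- ===== PRECONDITION & SPEC =====
def Spec_rem_space (t : String) (k : Int) (out : String) : Prop := out = rem_space_alt t k
instance (t : String) (k : Int) (out : String) : Decidable (Spec_rem_space t k out) := by unfold Spec_rem_space; infer_instance

-- ===== CLAIM (what is proved, stated in full; the proofs are below) =====
def Claim_equal_rem_space : Prop := ∀ (t : String) (k : Int), Dom_rem_space t k → Spec_rem_space t k (rem_space t k)

-- ===== LEMMAS AND PROOFS =====

lemma foldA_nonpos (cs : List Char) (r : List Char) (k : Int) (hk : k ≤ 0) :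
    (cs.foldl remStepA (r, k)).1 = r ++ cs := by
  induction cs generalizing r with
  | nil => simp
  | cons c cs ih =>
      simp only [List.foldl_cons, remStepA, if_neg (by omega : ¬ k > 0)]
      rw [ih (r ++ [c])]; simp

lemma foldA_eq_drop (cs : List Char) (r : List Char) (k : Int) :
    (cs.foldl remStepA (r, k)).1 = r ++ cs.drop (remCount cs k) := by
  induction cs generalizing r k with
  | nil => simp [remCount]
  | cons c cs ih =>
      by_cases hk : 0 < k
      · by_cases hc : c = ' '
        · simp only [List.foldl_cons, remStepA, if_pos hk, if_pos hc,
            remCount]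
          rw [if_pos ⟨hk, hc⟩]
          rw [ih r (k - 1)]
          simp
        · simp only [List.foldl_cons, remStepA, if_pos hk, if_neg hc,
            remCount]
          rw [if_neg (fun h => hc h.2)]
          rw [foldA_nonpos cs (r ++ [c]) 0 le_rfl]
          simp
      · simp only [List.foldl_cons, remStepA, if_neg hk,
          remCount]
        rw [if_neg (fun h => hk h.1)]
        rw [foldA_nonpos cs (r ++ [c]) k (by omega)]
        simp

-- ===== VERDICT (by name: the statement is the Claim_ definition above) =====
theorem rem_space_spec : Claim_equal_rem_space := by
  intro t k _
  unfold Spec_rem_space rem_space rem_space_alt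
  rw [foldA_eq_drop]
  simp
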